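-- pv_equiv track=rewrite | github.com/clarkyang37th/HackNYU-Themis | hack_nyu_tf_idf_and_cos_sim.py | tok_occurency
-- ===== SOURCE A (Python) =====
-- def st(query, dic, length, i):
--     for tok in query:
--         if tok not in dic:
--             dic[tok] = [0] * length
--             dic[tok][i] = 1
--         else:
--             dic[tok][i] = dic[tok][i] + 1
--     return dic
--
-- def tok_occurency(query_tokens, is_abstract=False):
--     number_docs = len(query_tokens)
--     dic = {}
--     for i, query in enumerate(query_tokens):
--         if not is_abstract:
--             dic = st(query, dic, number_docs, i)
--         else:
--             for sentence in query:
--                 dic = st(sentence, dic, number_docs, i)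
--
--     return dic
-- ===== SOURCE B (Python) =====
-- def tok_occurency(query_tokens, is_abstract=False):
--     number_docs = len(query_tokens)
--     # phase 1: flatten everything into one (token, doc_index) pair stream
--     pairs = []
--     for i, query in enumerate(query_tokens):
--         toks = (t for sentence in query for t in sentence) if is_abstract else query
--         for t in toks:
--             pairs.append((t, i))
--     # phase 2: key order = first occurrence order of tokens in the stream
--     order = []
--     seen = set()
--     for t, _ in pairs:
--         if t not in seen:
--             seen.add(t)
--             order.append(t)
--     # phase 3: count each (token, doc) cell once over the flat stream
--     cell = {}
--     for p in pairs:
--         cell[p] = cell.get(p, 0) + 1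
--     # phase 4: build each full row at once by closed-form cell lookup
--     return {t: [cell.get((t, i), 0) for i in range(number_docs)] for t in order}
-- ===== Notes on version B (the rewrite author's own statement) =====
-- stated objective: alternative
-- what changed: A mutates dic[tok][i] in place once per token occurrence, document by document; B never mutates a vector: it flattens the input into one flat (token, doc_index) pair stream, derives the key order by deduplicating that stream, counts each (token, doc) cell once over the stream, and finally materialises every full row at once by closed-form cell lookup in a dict comprehension.
import Mathlib
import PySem

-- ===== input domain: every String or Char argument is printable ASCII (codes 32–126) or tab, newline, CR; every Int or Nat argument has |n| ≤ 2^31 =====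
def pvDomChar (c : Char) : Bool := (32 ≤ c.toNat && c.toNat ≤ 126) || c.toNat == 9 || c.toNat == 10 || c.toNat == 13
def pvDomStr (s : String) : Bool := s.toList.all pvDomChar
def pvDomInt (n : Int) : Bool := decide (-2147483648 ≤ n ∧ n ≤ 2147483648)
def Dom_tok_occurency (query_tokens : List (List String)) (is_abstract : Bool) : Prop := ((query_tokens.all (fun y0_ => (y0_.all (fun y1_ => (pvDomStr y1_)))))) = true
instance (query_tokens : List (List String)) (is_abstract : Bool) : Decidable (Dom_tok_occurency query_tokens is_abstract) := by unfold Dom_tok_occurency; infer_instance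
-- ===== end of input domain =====

-- B replaces A's incremental in-place vector mutation by a flatten-dedup-count-materialise
-- pipeline over one (token, doc) pair stream; objective: alternative, same cost.

-- ===== PORT A =====
-- helper st ported statement for statement; [0]*length as List.replicate length.toNat
-- (exact: length = len(query_tokens) ≥ 0); list writes dic[tok][i] = v via PySem.List.pySetD.
def pvSt (query : List String) (dic : PySem.Dict String (List Int)) (length : Int) (i : Int) :
    PySem.Dict String (List Int) :=
  query.foldl (fun dic tok =>
    match dic.get? tok with
    | none =>
        let dic := dic.insert tok (List.replicate length.toNat (0 : Int))
        dic.insert tok (PySem.List.pySetD (dic.getD tok []) i 1)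
    | some v =>
        dic.insert tok (PySem.List.pySetD v i (PySem.List.pyGetD v i 0 + 1))) dic

def tok_occurency (query_tokens : List (List String)) (is_abstract : Bool) : List (String × List Int) :=
  let number_docs : Int := query_tokens.length
  ((PySem.List.enumerate query_tokens).foldl (fun dic p =>
      if !is_abstract then pvSt p.2 dic number_docs p.1
      else p.2.foldl (fun dic sentence =>
        -- iterating a Python str yields its characters as 1-character strings
        pvSt (sentence.toList.map (fun c => String.mk [c])) dic number_docs p.1) dic)
    PySem.Dict.empty).items

-- ===== PORT B =====
-- the generator '(t for sentence in query for t in sentence)' (chars of each sentence) resp. the plain token list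
def pvDocTokens (query : List String) (is_abstract : Bool) : List String :=
  if is_abstract then query.flatMap (fun s => s.toList.map (fun c => String.mk [c])) else query

def tok_occurency_alt (query_tokens : List (List String)) (is_abstract : Bool) : List (String × List Int) :=
  let number_docs : Int := query_tokens.length
  -- phase 1: flatten everything into one (token, doc_index) pair stream
  let pairs : List (String × Int) :=
    (PySem.List.enumerate query_tokens).foldl
      (fun acc p => acc ++ (pvDocTokens p.2 is_abstract).map (fun t => (t, p.1))) []
  -- phase 2: key order = first occurrence order of tokens in the stream (seen-set dedup)
  let order : List String := PySem.Set.ofList (pairs.map Prod.fst)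
  -- phase 3: count each (token, doc) cell once over the flat stream
  let cell : PySem.Dict (String × Int) Int :=
    pairs.foldl (fun c p => c.insert p (c.getD p 0 + 1)) PySem.Dict.empty
  -- phase 4: build each full row at once by closed-form cell lookup
  order.map (fun t => (t, (PySem.List.pyRange 0 number_docs 1).map (fun i => cell.getD (t, i) 0)))

-- ===== PRECONDITION & SPEC =====
def Spec_tok_occurency (query_tokens : List (List String)) (is_abstract : Bool) (out : List (String × List Int)) : Prop := out = tok_occurency_alt query_tokens is_abstract
instance (query_tokens : List (List String)) (is_abstract : Bool) (out : List (String × List Int)) : Decidable (Spec_tok_occurency query_tokens is_abstract out) := by unfold Spec_tok_occurency; infer_instance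

-- ===== CLAIM (what is proved, stated in full; the proofs are below) =====
def Claim_equal_tok_occurency : Prop := ∀ (query_tokens : List (List String)) (is_abstract : Bool), Dom_tok_occurency query_tokens is_abstract → Spec_tok_occurency query_tokens is_abstract (tok_occurency query_tokens is_abstract)

-- ===== LEMMAS AND PROOFS =====

def pvNewVal (n i : Nat) : Option (List Int) → List Int
  | none => (List.replicate n (0 : Int)).set i 1
  | some v => v.set i (v.getD i 0 + 1)

def pvStepA (n i : Nat) (d : PySem.Dict String (List Int)) (tok : String) :
    PySem.Dict String (List Int) :=
  d.insert tok (pvNewVal n i (d.get? tok))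

def pvFA (n : Int) (abs : Bool) (dic : PySem.Dict String (List Int)) (p : Int × List String) :
    PySem.Dict String (List Int) :=
  if !abs then pvSt p.2 dic n p.1
  else p.2.foldl (fun dic sentence =>
    pvSt (sentence.toList.map (fun c => String.mk [c])) dic n p.1) dic

-- the flat (token, doc index) pair stream, doc indices starting at j
def pvPairsAux : List (List String) → Bool → Nat → List (String × Nat)
  | [], _, _ => []
  | q :: rest, abs, j => (pvDocTokens q abs).map (fun t => (t, j)) ++ pvPairsAux rest abs (j + 1)

-- the full count row of token t over docs 0..n-1, read off the pair stream
def pvVec (n : Nat) (P : List (String × Nat)) (t : String) : List Int :=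
  (List.range n).map (fun i => (P.count (t, i) : Int))

lemma pvSt_eq (n i : Nat) (query : List String) (d : PySem.Dict String (List Int)) :
    pvSt query d (n : Int) (i : Int) = query.foldl (pvStepA n i) d := by
  unfold pvSt
  congr 1
  funext d tok
  cases h : d.get? tok with
  | none =>
      simp [pvStepA, pvNewVal, h, PySem.List.pySetD_natCast, PySem.Dict.getD_insert_self,
        PySem.Dict.insert_insert_self]
  | some v =>
      simp [pvStepA, pvNewVal, h, PySem.List.pySetD_natCast, PySem.List.pyGetD_natCast,
        List.getD_eq_getElem?_getD]

lemma pvFA_eq (n j : Nat) (abs : Bool) (d : PySem.Dict String (List Int)) (q : List String) :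
    pvFA (n : Int) abs d ((j : Int), q) = (pvDocTokens q abs).foldl (pvStepA n j) d := by
  cases abs with
  | false => simpa [pvFA, pvDocTokens] using pvSt_eq n j q d
  | true =>
      show q.foldl (fun dic sentence =>
        pvSt (sentence.toList.map (fun c => String.mk [c])) dic (n : Int) (j : Int)) d = _
      calc q.foldl (fun dic sentence =>
            pvSt (sentence.toList.map (fun c => String.mk [c])) dic (n : Int) (j : Int)) d
          = q.foldl (fun dic sentence =>
            (sentence.toList.map (fun c => String.mk [c])).foldl (pvStepA n j) dic) d := by
            congr 1; funext dic s; exact pvSt_eq n j _ dic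
        _ = (q.flatMap (fun s => s.toList.map (fun c => String.mk [c]))).foldl (pvStepA n j) d :=
            List.foldl_flatMap.symm
        _ = (pvDocTokens q true).foldl (pvStepA n j) d := rfl

-- A's whole loop is the fold of pvStepA over the flat pair stream
lemma pvA_pairs (n : Nat) (abs : Bool) : ∀ (docs : List (List String)) (j : Nat)
    (d : PySem.Dict String (List Int)),
    (PySem.List.enumerate docs (j : Int)).foldl (pvFA (n : Int) abs) d
      = (pvPairsAux docs abs j).foldl (fun d p => pvStepA n p.2 d p.1) d := by
  intro docs
  induction docs with
  | nil => intro j d; rfl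
  | cons q rest ih =>
      intro j d
      have hcast : ((j : Int) + 1) = ((j + 1 : Nat) : Int) := by push_cast; ring
      show List.foldl (pvFA (n : Int) abs) (pvFA (n : Int) abs d ((j : Int), q))
          (PySem.List.enumerate rest ((j : Int) + 1)) = _
      rw [hcast, ih (j + 1)]
      show _ = (((pvDocTokens q abs).map (fun t => (t, j))) ++ pvPairsAux rest abs (j + 1)).foldl
        (fun d p => pvStepA n p.2 d p.1) d
      rw [List.foldl_append, List.foldl_map, pvFA_eq]

lemma pvPairsAux_snd_lt (abs : Bool) : ∀ (docs : List (List String)) (j : Nat),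
    ∀ p ∈ pvPairsAux docs abs j, p.2 < j + docs.length := by
  intro docs
  induction docs with
  | nil => intro j p hp; simp [pvPairsAux] at hp
  | cons q rest ih =>
      intro j p hp
      simp only [pvPairsAux, List.mem_append, List.mem_map] at hp
      rcases hp with ⟨t, _, rfl⟩ | hp
      · simp
      · have := ih (j + 1) p hp
        simp at this ⊢; omega

lemma pvKeys_fold (n : Nat) (P : List (String × Nat)) :
    (P.foldl (fun d p => pvStepA n p.2 d p.1) PySem.Dict.empty).keys
      = PySem.Set.ofList (P.map Prod.fst) := by
  have h := PySem.Dict.keys_foldl_insert_key P Prod.fst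
    (fun d p => pvNewVal n p.2 (d.get? p.1)) PySem.Dict.empty
  simpa [pvStepA, PySem.Dict.keys_empty, PySem.Set.ofList_eq_foldl, PySem.Set.update] using h

lemma pvOfList_append_mem {xs : List String} {t : String} (ht : t ∈ xs) :
    PySem.Set.ofList (xs ++ [t]) = PySem.Set.ofList xs := by
  rw [PySem.Set.ofList_append]
  simp [PySem.Set.update, PySem.Set.add, PySem.Set.mem_ofList, ht]

lemma pvOfList_append_not_mem {xs : List String} {t : String} (ht : t ∉ xs) :
    PySem.Set.ofList (xs ++ [t]) = PySem.Set.ofList xs ++ [t] := by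
  rw [PySem.Set.ofList_append]
  simp [PySem.Set.update, PySem.Set.add, PySem.Set.mem_ofList, ht]

lemma pvVec_getD (n i : Nat) (P : List (String × Nat)) (t : String) (hi : i < n) :
    (pvVec n P t).getD i 0 = (P.count (t, i) : Int) := by
  simp [pvVec, List.getD_eq_getElem?_getD, hi]

lemma pvVec_append_ne (n : Nat) (P : List (String × Nat)) (t t' : String) (i : Nat)
    (h : t' ≠ t) : pvVec n (P ++ [(t, i)]) t' = pvVec n P t' := by
  unfold pvVec
  apply List.map_congr_left
  intro j _
  have hz : List.count ((t', j) : String × Nat) [(t, i)] = 0 :=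
    List.count_eq_zero_of_not_mem (by simp [Prod.ext_iff]; exact fun hc _ => h hc)
  rw [List.count_append, hz]
  simp

lemma pvVec_append_self (n i : Nat) (P : List (String × Nat)) (t : String) (hi : i < n) :
    pvVec n (P ++ [(t, i)]) t = (pvVec n P t).set i ((pvVec n P t).getD i 0 + 1) := by
  apply List.ext_getElem
  · simp [pvVec]
  · intro j h1 h2
    have hj : j < n := by simpa [pvVec] using h1
    rw [List.getElem_set]
    by_cases hij : i = j
    · subst hij
      rw [if_pos rfl, pvVec_getD n i P t hi]
      have hone : List.count ((t, i) : String × Nat) [(t, i)] = 1 := by simp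
      simp only [pvVec, List.getElem_map, List.getElem_range, List.count_append, hone]
      push_cast
      ring
    · rw [if_neg hij]
      have hz : List.count ((t, j) : String × Nat) [(t, i)] = 0 :=
        List.count_eq_zero_of_not_mem (by simp [Prod.ext_iff]; omega)
      simp only [pvVec, List.getElem_map, List.getElem_range, List.count_append, hz,
        Nat.add_zero]

lemma pvVec_fresh (n i : Nat) (P : List (String × Nat)) (t : String) (hi : i < n)
    (ht : t ∉ P.map Prod.fst) : pvVec n (P ++ [(t, i)]) t = (List.replicate n (0 : Int)).set i 1 := by
  apply List.ext_getElem
  · simp [pvVec]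
  · intro j h1 h2
    have hj : j < n := by simpa [pvVec] using h1
    have hz0 : List.count ((t, j) : String × Nat) P = 0 := by
      apply List.count_eq_zero_of_not_mem
      intro hc
      exact ht (List.mem_map.2 ⟨(t, j), hc, rfl⟩)
    rw [List.getElem_set]
    by_cases hij : i = j
    · subst hij
      rw [if_pos rfl]
      have hone : List.count ((t, i) : String × Nat) [(t, i)] = 1 := by simp
      simp only [pvVec, List.getElem_map, List.getElem_range, List.count_append, hz0, hone]
      norm_num
    · rw [if_neg hij]
      have hz : List.count ((t, j) : String × Nat) [(t, i)] = 0 :=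
        List.count_eq_zero_of_not_mem (by simp [Prod.ext_iff]; omega)
      simp only [pvVec, List.getElem_map, List.getElem_range, List.count_append, hz0, hz]
      simp [hj]

-- characterization of A's dict after the whole flat pair stream
lemma pvChar (n : Nat) (P : List (String × Nat)) (hP : ∀ p ∈ P, p.2 < n) :
    (P.foldl (fun d p => pvStepA n p.2 d p.1) PySem.Dict.empty).items
      = (PySem.Set.ofList (P.map Prod.fst)).map (fun t => (t, pvVec n P t)) := by
  induction P using List.reverseRecOn with
  | nil => rfl
  | append_singleton P q ih =>
      obtain ⟨t, i⟩ := q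
      have hi : i < n := hP (t, i) (by simp)
      have hP' : ∀ p ∈ P, p.2 < n := fun p hp => hP p (by simp [hp])
      rw [List.foldl_append, List.foldl_cons, List.foldl_nil]
      have hkeys := pvKeys_fold n P
      have hnd : (P.foldl (fun d p => pvStepA n p.2 d p.1) PySem.Dict.empty).keys.Nodup := by
        rw [hkeys]; exact PySem.Set.nodup_ofList _
      set d := P.foldl (fun d p => pvStepA n p.2 d p.1) PySem.Dict.empty with hd
      by_cases ht : t ∈ P.map Prod.fst
      · have hmem : (t, pvVec n P t) ∈ d.items := by
          rw [ih hP']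
          exact List.mem_map.2 ⟨t, (PySem.Set.mem_ofList _ _).2 ht, rfl⟩
        have hget : d.get? t = some (pvVec n P t) := PySem.Dict.get?_of_mem_items _ hmem hnd
        have hc : d.contains t = true := by
          rw [PySem.Dict.contains_eq_isSome_get?, hget]; rfl
        show (d.insert t (pvNewVal n i (d.get? t))).items = _
        rw [hget, PySem.Dict.items_insert_of_contains _ _ hc, ih hP']
        have hfst : (P ++ [(t, i)]).map Prod.fst = P.map Prod.fst ++ [t] := by simp
        rw [hfst, pvOfList_append_mem ht, List.map_map]
        apply List.map_congr_left
        intro t' ht'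
        by_cases h : t' = t
        · subst h
          simp [Function.comp, pvNewVal, pvVec_append_self n i P t' hi]
        · have : t' ≠ t := h
          simp [Function.comp, this, pvVec_append_ne n P t t' i this]
      · have hc : d.contains t = false := by
          rw [PySem.Dict.contains_eq_decide_mem_keys, hkeys]
          simp [PySem.Set.mem_ofList, ht]
        have hget : d.get? t = none := by
          have := PySem.Dict.contains_eq_isSome_get? (d := d) (k := t)
          rw [hc] at this
          exact Option.not_isSome_iff_eq_none.1 (by rw [← this]; simp)
        show (d.insert t (pvNewVal n i (d.get? t))).items = _
        rw [hget, PySem.Dict.items_insert_of_not_contains _ _ hc, ih hP']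
        have hfst : (P ++ [(t, i)]).map Prod.fst = P.map Prod.fst ++ [t] := by simp
        rw [hfst, pvOfList_append_not_mem ht, List.map_append]
        congr 1
        · apply List.map_congr_left
          intro t' ht'
          have : t' ≠ t := by
            intro h
            exact ht (h ▸ (PySem.Set.mem_ofList _ _).1 ht')
          rw [pvVec_append_ne n P t t' i this]
        · simp [pvNewVal, pvVec_fresh n i P t hi ht]

-- B's pair-building loop produces the Int-cast flat pair stream
lemma pvPairsInt (abs : Bool) : ∀ (docs : List (List String)) (j : Nat)
    (acc : List (String × Int)),
    (PySem.List.enumerate docs (j : Int)).foldl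
        (fun acc p => acc ++ (pvDocTokens p.2 abs).map (fun t => (t, p.1))) acc
      = acc ++ (pvPairsAux docs abs j).map (fun p => (p.1, (p.2 : Int))) := by
  intro docs
  induction docs with
  | nil => intro j acc; simp [pvPairsAux]
  | cons q rest ih =>
      intro j acc
      have hcast : ((j : Int) + 1) = ((j + 1 : Nat) : Int) := by push_cast; ring
      show List.foldl _ (acc ++ (pvDocTokens q abs).map (fun t => (t, (j : Int))))
          (PySem.List.enumerate rest ((j : Int) + 1)) = _
      rw [hcast, ih (j + 1)]
      show _ = acc ++ (((pvDocTokens q abs).map (fun t => (t, j))) ++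
        pvPairsAux rest abs (j + 1)).map (fun p => (p.1, (p.2 : Int)))
      simp [List.map_map, Function.comp, List.append_assoc]

lemma pvCastInj : Function.Injective (fun p : String × Nat => (p.1, (p.2 : Int))) := by
  intro p q h
  have h1 := congrArg Prod.fst h
  have h2 := congrArg Prod.snd h
  simp at h1 h2
  exact Prod.ext h1 h2

-- ===== VERDICT (by name: the statement is the Claim_ definition above) =====
theorem tok_occurency_spec : Claim_equal_tok_occurency := by
  intro qt abs _
  unfold Spec_tok_occurency tok_occurency tok_occurency_alt
  set P := pvPairsAux qt abs 0 with hPdef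
  have hbound : ∀ p ∈ P, p.2 < qt.length := by
    intro p hp
    have := pvPairsAux_snd_lt abs qt 0 p hp
    omega
  have hA : ((PySem.List.enumerate qt).foldl (pvFA (qt.length : Int) abs) PySem.Dict.empty).items
      = (PySem.Set.ofList (P.map Prod.fst)).map (fun t => (t, pvVec qt.length P t)) := by
    rw [show (PySem.List.enumerate qt : List (Int × List String))
        = PySem.List.enumerate qt ((0 : Nat) : Int) from rfl]
    rw [pvA_pairs qt.length abs qt 0 PySem.Dict.empty]
    exact pvChar qt.length P hbound
  have hpairs : (PySem.List.enumerate qt).foldl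
      (fun acc p => acc ++ (pvDocTokens p.2 abs).map (fun t => (t, p.1))) ([] : List (String × Int))
      = P.map (fun p => (p.1, (p.2 : Int))) := by
    simpa using pvPairsInt abs qt 0 []
  have hB : (fun (number_docs : Int) =>
      (fun (pairs : List (String × Int)) =>
        (fun (order : List String) =>
          (fun (cell : PySem.Dict (String × Int) Int) =>
            order.map (fun t => (t, (PySem.List.pyRange 0 number_docs 1).map
              (fun i => cell.getD (t, i) 0))))
          (pairs.foldl (fun c p => c.insert p (c.getD p 0 + 1)) PySem.Dict.empty))
        (PySem.Set.ofList (pairs.map Prod.fst)))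
      ((PySem.List.enumerate qt).foldl
        (fun acc p => acc ++ (pvDocTokens p.2 abs).map (fun t => (t, p.1))) []))
      ((qt.length : Int))
      = (PySem.Set.ofList ((P.map (fun p => (p.1, (p.2 : Int)))).map Prod.fst)).map
          (fun t => (t, (PySem.List.pyRange 0 (qt.length : Int) 1).map (fun i =>
            ((P.map (fun p => (p.1, (p.2 : Int)))).foldl
              (fun c p => c.insert p (c.getD p 0 + 1)) PySem.Dict.empty).getD (t, i) 0))) := by
    rw [hpairs]
  show ((PySem.List.enumerate qt).foldl (pvFA (qt.length : Int) abs) PySem.Dict.empty).items = _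
  rw [hA]
  refine Eq.trans ?_ hB.symm
  have horder : (P.map (fun p => (p.1, (p.2 : Int)))).map Prod.fst = P.map Prod.fst := by
    simp [List.map_map, Function.comp]
  rw [horder]
  apply List.map_congr_left
  intro t _
  refine Prod.ext rfl ?_
  show pvVec qt.length P t
    = (PySem.List.pyRange 0 (qt.length : Int) 1).map (fun i =>
        ((P.map (fun p => (p.1, (p.2 : Int)))).foldl (fun c p => c.insert p (c.getD p 0 + 1))
          PySem.Dict.empty).getD (t, i) 0)
  rw [PySem.Dict.foldl_insert_getD_add_one_eq_counter]
  rw [PySem.List.pyRange_zero_natCast, List.map_map]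
  unfold pvVec
  apply List.map_congr_left
  intro k _
  show (P.count (t, k) : Int)
    = (PySem.Dict.counter (P.map (fun p => (p.1, (p.2 : Int))))).getD (t, (k : Int)) 0
  rw [PySem.Dict.getD_counter]
  rw [show ((t, (k : Int)) : String × Int) = (fun p : String × Nat => (p.1, (p.2 : Int))) (t, k) from rfl]
  rw [List.count_map_of_injective _ _ pvCastInj]
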